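-- pv_equiv track=rewrite | github.com/pypi-data/pypi-mirror-402 | packages/hop3-cli/hop3_cli-0.4.0b1-py3-none-any.whl/hop3_cli/commands/help.py | _process_help_text_with_local_commands
-- ===== SOURCE A (Python) =====
-- def _process_help_text_with_local_commands(
--     text: str,
--     local_commands: dict[str, str],
-- ) -> str:
--     """Process help text and inject local commands into COMMANDS section."""
--     lines = text.split("\n")
--     new_lines = []
--     in_commands_section = False
--     injected: set[str] = set()
--
--     for line in lines:
--         if line.strip() in {"COMMANDS", "ALL COMMANDS"}:
--             in_commands_section = True
--             new_lines.append(line)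
--             continue
--
--         if in_commands_section and line.strip() and not line.startswith("  "):
--             # Leaving COMMANDS section - inject remaining commands first
--             new_lines.extend(_inject_remaining_commands(local_commands, injected))
--             in_commands_section = False
--
--         if in_commands_section and _is_command_line(line):
--             current_cmd = _get_command_name(line)
--             if current_cmd:
--                 new_lines.extend(
--                     _inject_commands_before(current_cmd, local_commands, injected)
--                 )
--
--         new_lines.append(line)
--
--     # If still in commands section at end, inject remaining
--     if in_commands_section:
--         remaining = _inject_remaining_commands(local_commands, injected)
--         if remaining:
--             # Insert after last command line
--             insert_idx = len(new_lines)
--             for i in range(len(new_lines) - 1, -1, -1):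
--                 if _is_command_line(new_lines[i]):
--                     insert_idx = i + 1
--                     break
--             for j, cmd_line in enumerate(remaining):
--                 new_lines.insert(insert_idx + j, cmd_line)
--
--     return "\n".join(new_lines)
--
-- def _inject_remaining_commands(
--     local_commands: dict[str, str],
--     injected: set[str],
-- ) -> list[str]:
--     """Return all local commands not yet injected."""
--     lines = []
--     for cmd in sorted(local_commands.keys()):
--         if cmd not in injected:
--             lines.append(_format_help_command(cmd, local_commands[cmd]))
--             injected.add(cmd)
--     return lines
--
-- def _is_command_line(line: str) -> bool:
--     """Check if a line is a command entry (indented, non-empty)."""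
--     return line.startswith("  ") and bool(line.strip())
--
-- def _get_command_name(line: str) -> str | None:
--     """Extract command name from a help line."""
--     parts = line.strip().split(None, 1)
--     return parts[0] if parts else None
--
-- def _inject_commands_before(
--     current_cmd: str,
--     local_commands: dict[str, str],
--     injected: set[str],
-- ) -> list[str]:
--     """Return local commands that should appear before current_cmd alphabetically."""
--     lines = []
--     for cmd in sorted(local_commands.keys()):
--         if cmd not in injected and cmd < current_cmd:
--             lines.append(_format_help_command(cmd, local_commands[cmd]))
--             injected.add(cmd)
--     return lines
--
-- def _format_help_command(name: str, description: str) -> str: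
--     """Format a command entry for help output."""
--     return f"  {name:16} {description}"
-- ===== SOURCE B (Python) =====
-- def _format_help_command(name: str, description: str) -> str:
--     """Format a command entry for help output."""
--     return f"  {name:16} {description}"
--
--
-- def _process_help_text_with_local_commands(text, local_commands):
--     """Sort the command names once and advance a pointer to emit pending
--     commands in alphabetical order, instead of re-sorting and re-scanning
--     the whole dict (with an 'injected' set) for every command line."""
--     keys = sorted(local_commands)
--     n = len(keys)
--     out = []
--     in_section = False
--     i = 0  # keys[:i] have been emitted already
--     for line in text.split("\n"):
--         stripped = line.strip()
--         if stripped in ("COMMANDS", "ALL COMMANDS"):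
--             in_section = True
--             out.append(line)
--             continue
--         if in_section:
--             if stripped and not line.startswith("  "):
--                 while i < n:
--                     out.append(_format_help_command(keys[i], local_commands[keys[i]]))
--                     i += 1
--                 in_section = False
--             elif stripped:
--                 cmd = stripped.split(None, 1)[0]
--                 while i < n and keys[i] < cmd:
--                     out.append(_format_help_command(keys[i], local_commands[keys[i]]))
--                     i += 1
--         out.append(line)
--     if in_section and i < n:
--         idx = len(out)
--         for j in range(len(out) - 1, -1, -1):
--             if out[j].startswith("  ") and out[j].strip():
--                 idx = j + 1
--                 break
--         out[idx:idx] = [_format_help_command(k, local_commands[k]) for k in keys[i:]]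
--     return "\n".join(out)
-- ===== Notes on version B (the rewrite author's own statement) =====
-- stated objective: alternative
-- what changed: B sorts the command names once up front and advances a single forward-only pointer over the sorted list to emit pending commands, instead of A's re-sorting the dict keys and re-scanning them against an 'injected' membership set at every command line.
import Mathlib
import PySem

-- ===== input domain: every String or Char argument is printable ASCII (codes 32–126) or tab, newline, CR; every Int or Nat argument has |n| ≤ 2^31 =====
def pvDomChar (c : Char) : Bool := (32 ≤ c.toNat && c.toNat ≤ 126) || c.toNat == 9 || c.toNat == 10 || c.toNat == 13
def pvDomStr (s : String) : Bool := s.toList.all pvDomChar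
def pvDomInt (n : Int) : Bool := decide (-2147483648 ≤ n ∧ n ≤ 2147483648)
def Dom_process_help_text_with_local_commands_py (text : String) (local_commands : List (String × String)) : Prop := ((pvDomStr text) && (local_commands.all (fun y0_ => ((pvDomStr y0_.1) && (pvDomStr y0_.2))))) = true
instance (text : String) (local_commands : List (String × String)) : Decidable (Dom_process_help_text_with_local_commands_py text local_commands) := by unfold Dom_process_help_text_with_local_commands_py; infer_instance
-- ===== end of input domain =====

-- B replaces A's per-line re-sort/re-scan of the command dict (with an 'injected' set)
-- by one up-front sort and a pointer (remaining-suffix) over the sorted keys that only moves forward.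

-- ===== PORT A =====
-- helpers shared verbatim by both Python versions (_format_help_command, the
-- COMMANDS-header test, _is_command_line, and the backward search for the insert index)
def fmtHelp (name desc : String) : String :=
  String.ofList (' ' :: ' ' :: (name.toList ++ List.replicate (16 - name.toList.length) ' ') ++ ' ' :: desc.toList)

def isHeaderLine (line : String) : Bool :=
  PySem.Str.strip line == "COMMANDS" || PySem.Str.strip line == "ALL COMMANDS"

def isCmdLine (line : String) : Bool :=
  PySem.Str.startswith line "  " && !(PySem.Str.strip line == "")

-- 'for i in range(len(out)-1,-1,-1): if is_cmd(out[i]): return i+1' — first command line from the end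
def pvInsertIdx (out : List String) : Nat :=
  match out.reverse.findIdx? isCmdLine with
  | some k => out.length - k
  | none => out.length

-- _inject_remaining_commands and _inject_commands_before are the same loop over
-- sorted(local_commands) with filters 'not injected' resp. 'not injected and < cmd': loop factored, filter q passed in
def injectLoopA (d : PySem.Dict String String) (q : String → Bool) (inj : PySem.Set String) :
    List String × PySem.Set String :=
  (PySem.List.sorted (PySem.Dict.keys d) (fun x => x) false).foldl
    (fun p k => if !(PySem.Set.contains p.2 k) && q k then
        (p.1 ++ [fmtHelp k (PySem.Dict.getD d k "")], PySem.Set.add p.2 k)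
      else p)
    ([], inj)

def injectRemainingA (d : PySem.Dict String String) (inj : PySem.Set String) := injectLoopA d (fun _ => true) inj
def injectBeforeA (c : String) (d : PySem.Dict String String) (inj : PySem.Set String) := injectLoopA d (fun k => decide (k < c)) inj

def stepA (d : PySem.Dict String String) (st : List String × Bool × PySem.Set String) (line : String) :
    List String × Bool × PySem.Set String :=
  if isHeaderLine line then (st.1 ++ [line], true, st.2.2)
  else
    let s1 : List String × Bool × PySem.Set String :=
      if st.2.1 && !(PySem.Str.strip line == "") && !(PySem.Str.startswith line "  ") then
        let r := injectRemainingA d st.2.2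
        (st.1 ++ r.1, false, r.2)
      else st
    let s2 : List String × Bool × PySem.Set String :=
      if s1.2.1 && isCmdLine line then
        match PySem.Str.split₀Max (PySem.Str.strip line) 1 with
        | [] => s1
        | c :: _ =>
          if c == "" then s1
          else
            let r := injectBeforeA c d s1.2.2
            (s1.1 ++ r.1, s1.2.1, r.2)
      else s1
    (s2.1 ++ [line], s2.2.1, s2.2.2)

-- 'for j, cmd_line in enumerate(remaining): new_lines.insert(insert_idx + j, cmd_line)'
def insertSeqA (acc : List String) (idx : Int) : List String → List String
  | [] => acc
  | l :: rest => insertSeqA (PySem.List.insert acc idx l) (idx + 1) rest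

-- text.split("\n"): the separator is the nonempty literal "\n", so split? is never none
def pySplitNL (text : String) : List String := (PySem.Str.split? text "\n").getD []

def process_help_text_with_local_commands_py (text : String) (local_commands : List (String × String)) : String :=
  let d := PySem.Dict.ofList local_commands
  let st : List String × Bool × PySem.Set String := (pySplitNL text).foldl (stepA d) ([], false, PySem.Set.empty)
  let nl :=
    if st.2.1 then
      let remaining := (injectRemainingA d st.2.2).1
      if remaining == [] then st.1
      else insertSeqA st.1 (pvInsertIdx st.1 : Int) remaining
    else st.1
  PySem.Str.join "\n" nl

-- ===== PORT B =====
-- '[_format_help_command(k, local_commands[k]) for k in keys[i:]]' / the drained pointer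
def emitAllB (d : PySem.Dict String String) : List String → List String
  | [] => []
  | k :: rest => fmtHelp k (PySem.Dict.getD d k "") :: emitAllB d rest

-- 'while i < n and keys[i] < cmd: out.append(...); i += 1' — the pointer is the remaining suffix
def emitWhileB (d : PySem.Dict String String) (cmd : String) : List String → List String × List String
  | [] => ([], [])
  | k :: rest =>
    if k < cmd then
      let r := emitWhileB d cmd rest
      (fmtHelp k (PySem.Dict.getD d k "") :: r.1, r.2)
    else ([], k :: rest)

def loopB (d : PySem.Dict String String) :
    List String → List String → Bool → List String → List String × Bool × List String
  | [], out, sec, pend => (out, sec, pend)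
  | line :: rest, out, sec, pend =>
    if isHeaderLine line then loopB d rest (out ++ [line]) true pend
    else if sec then
      if !(PySem.Str.strip line == "") && !(PySem.Str.startswith line "  ") then
        loopB d rest (out ++ emitAllB d pend ++ [line]) false []
      else if !(PySem.Str.strip line == "") then
        -- stripped.split(None, 1)[0]; the stripped line is nonempty so the word list is
        -- never empty — headD "" is the unreachable-IndexError-free reading of [0]
        let cmd := (PySem.Str.split₀Max (PySem.Str.strip line) 1).headD ""
        let r := emitWhileB d cmd pend
        loopB d rest (out ++ r.1 ++ [line]) sec r.2
      else loopB d rest (out ++ [line]) sec pend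
    else loopB d rest (out ++ [line]) sec pend

def process_help_text_with_local_commands_py_alt (text : String) (local_commands : List (String × String)) : String :=
  let d := PySem.Dict.ofList local_commands
  let st := loopB d (pySplitNL text) [] false
      (PySem.List.sorted (PySem.Dict.keys d) (fun x => x) false)
  let out :=
    if st.2.1 && !(st.2.2 == []) then
      let idx := pvInsertIdx st.1
      -- 'out[idx:idx] = [...]' — splice by slice assignment
      st.1.take idx ++ emitAllB d st.2.2 ++ st.1.drop idx
    else st.1
  PySem.Str.join "\n" out

-- ===== PRECONDITION & SPEC =====
def Spec_process_help_text_with_local_commands_py (text : String) (local_commands : List (String × String)) (out : String) : Prop := out = process_help_text_with_local_commands_py_alt text local_commands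
instance (text : String) (local_commands : List (String × String)) (out : String) : Decidable (Spec_process_help_text_with_local_commands_py text local_commands out) := by unfold Spec_process_help_text_with_local_commands_py; infer_instance

-- ===== CLAIM (what is proved, stated in full; the proofs are below) =====
def Claim_equal_process_help_text_with_local_commands_py : Prop := ∀ (text : String) (local_commands : List (String × String)), Dom_process_help_text_with_local_commands_py text local_commands → Spec_process_help_text_with_local_commands_py text local_commands (process_help_text_with_local_commands_py text local_commands)

-- ===== LEMMAS AND PROOFS =====

theorem emitAllB_eq_map (d : PySem.Dict String String) (l : List String) :
    emitAllB d l = l.map (fun k => fmtHelp k (PySem.Dict.getD d k "")) := by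
  induction l with
  | nil => rfl
  | cons k t ih => simp [emitAllB, ih]

theorem emitWhileB_eq (d : PySem.Dict String String) (c : String) (l : List String) :
    emitWhileB d c l = ((l.takeWhile (fun k => decide (k < c))).map (fun k => fmtHelp k (PySem.Dict.getD d k "")),
      l.dropWhile (fun k => decide (k < c))) := by
  induction l with
  | nil => rfl
  | cons k t ih =>
    by_cases h : k < c
    · have h' := String.lt_iff_toList_lt.mp h
      simp [emitWhileB, h, h', ih]
    · have h' : ¬ k.toList < c.toList := fun hh => h (String.lt_iff_toList_lt.mpr hh)
      simp [emitWhileB, h, h']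

theorem set_contains_false_iff (s : PySem.Set String) (x : String) :
    PySem.Set.contains s x = false ↔ x ∉ s := by
  rw [← Bool.not_eq_true, PySem.Set.contains_iff]

theorem injectLoop_skip (d : PySem.Dict String String) (q : String → Bool) :
    ∀ (ks : List String) (L : List String) (inj : PySem.Set String),
      (∀ k ∈ ks, PySem.Set.contains inj k = true) →
      ks.foldl (fun p k => if !(PySem.Set.contains p.2 k) && q k then
          (p.1 ++ [fmtHelp k (PySem.Dict.getD d k "")], PySem.Set.add p.2 k) else p) (L, inj) = (L, inj) := by
  intro ks
  induction ks with
  | nil => intro L inj _; rfl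
  | cons k t ih =>
    intro L inj hall
    have hk : k ∈ inj := (PySem.Set.contains_iff inj k).mp (hall k (List.mem_cons_self ..))
    rw [List.foldl_cons, if_neg (by simp [hk])]
    exact ih L inj (fun x hx => hall x (List.mem_cons_of_mem _ hx))

theorem injectLoop_fresh (d : PySem.Dict String String) (q : String → Bool) :
    ∀ (ks : List String) (L : List String) (inj : PySem.Set String),
      ks.Nodup →
      (∀ k ∈ ks, PySem.Set.contains inj k = false) →
      ks.foldl (fun p k => if !(PySem.Set.contains p.2 k) && q k then
          (p.1 ++ [fmtHelp k (PySem.Dict.getD d k "")], PySem.Set.add p.2 k) else p) (L, inj) =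
        (L ++ (ks.filter q).map (fun k => fmtHelp k (PySem.Dict.getD d k "")), inj ++ ks.filter q) := by
  intro ks
  induction ks with
  | nil => intro L inj _ _; simp
  | cons k t ih =>
    intro L inj hnd hall
    have hk : k ∉ inj := (set_contains_false_iff inj k).mp (hall k (List.mem_cons_self ..))
    have hadd : PySem.Set.add inj k = inj ++ [k] := by
      simp [PySem.Set.add, hk]
    by_cases hq : q k = true
    · rw [List.foldl_cons, if_pos (by simp [hk, hq]), hadd]
      rw [ih (L ++ [fmtHelp k (PySem.Dict.getD d k "")]) (inj ++ [k]) hnd.of_cons]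
      · simp [hq, List.append_assoc]
      · intro x hx
        rw [set_contains_false_iff]
        simp only [List.mem_append, List.mem_singleton]
        push Not
        exact ⟨(set_contains_false_iff inj x).mp (hall x (List.mem_cons_of_mem _ hx)),
          fun hxk => (List.nodup_cons.mp hnd).1 (hxk ▸ hx)⟩
    · rw [List.foldl_cons, if_neg (by simp [hk, hq])]
      rw [ih L inj hnd.of_cons (fun x hx => hall x (List.mem_cons_of_mem _ hx))]
      simp [hq]

-- A's inject loops, started from a prefix of the sorted keys, emit exactly the filtered suffix
theorem injectLoopA_eq (d : PySem.Dict String String) (q : String → Bool)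
    (inj rem : List String) (h : inj ++ rem = PySem.List.sorted (PySem.Dict.keys d) (fun x => x) false)
    (hnd : (PySem.List.sorted (PySem.Dict.keys d) (fun x => x) false).Nodup) :
    injectLoopA d q inj = ((rem.filter q).map (fun k => fmtHelp k (PySem.Dict.getD d k "")), inj ++ rem.filter q) := by
  unfold injectLoopA
  rw [← h, List.foldl_append]
  rw [injectLoop_skip d q inj [] inj (fun k hk => (PySem.Set.contains_iff inj k).mpr hk)]
  have hnd' : (inj ++ rem).Nodup := h ▸ hnd
  obtain ⟨-, hrem, hdisj⟩ := List.nodup_append.mp hnd'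
  rw [injectLoop_fresh d q rem [] inj hrem]
  · simp
  · intro k hk
    rw [set_contains_false_iff]
    exact fun hmem => hdisj k hmem k hk rfl

theorem filter_eq_takeWhile_mono (p : String → Bool)
    (hmono : ∀ a b : String, a ≤ b → p b = true → p a = true) :
    ∀ l : List String, l.Pairwise (· ≤ ·) → l.filter p = l.takeWhile p := by
  intro l
  induction l with
  | nil => intro _; rfl
  | cons a t ih =>
    intro hpw
    obtain ⟨ha, hpw'⟩ := List.pairwise_cons.mp hpw
    by_cases hpa : p a = true
    · rw [List.filter_cons, List.takeWhile_cons, if_pos hpa, if_pos hpa, ih hpw']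
    · rw [List.filter_cons, List.takeWhile_cons, if_neg hpa, if_neg hpa]
      exact List.filter_eq_nil_iff.mpr
        (fun b hb => fun hpb => hpa (hmono a b (ha b hb) hpb))

theorem not_lt_empty_string (s : String) : ¬ s < "" := by
  simp [String.lt_iff_toList_lt]

theorem emitWhileB_empty (d : PySem.Dict String String) (l : List String) :
    emitWhileB d "" l = ([], l) := by
  cases l with
  | nil => rfl
  | cons k t => simp [emitWhileB, not_lt_empty_string k]

theorem insertSeqA_eq (seg : List String) :
    ∀ (acc : List String) (p : Nat), p ≤ acc.length →
      insertSeqA acc (p : Int) seg = acc.take p ++ seg ++ acc.drop p := by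
  induction seg with
  | nil => intro acc p _; simp [insertSeqA]
  | cons l rest ih =>
    intro acc p hp
    show insertSeqA (PySem.List.insert acc (p : Int) l) ((p : Int) + 1) rest = _
    rw [PySem.List.insert_natCast acc p l hp]
    have hcast : ((p : Int) + 1) = ((p + 1 : Nat) : Int) := by push_cast; ring
    rw [hcast, ih (acc.take p ++ l :: acc.drop p) (p + 1)
      (by simp; omega)]
    have hlen : (acc.take p).length = p := by simp [List.length_take]; omega
    rw [List.take_append, List.drop_append, hlen]
    have h1 : p + 1 - p = 1 := by omega
    have h2 : (acc.take p).take (p+1) = acc.take p := List.take_of_length_le (by omega)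
    have h3 : (acc.take p).drop (p+1) = [] := List.drop_eq_nil_of_le (by omega)
    simp [h1, h2, h3]

theorem pvInsertIdx_le (out : List String) : pvInsertIdx out ≤ out.length := by
  unfold pvInsertIdx
  cases h : out.reverse.findIdx? isCmdLine <;> simp

-- main loop correspondence
theorem loop_corr (d : PySem.Dict String String)
    (hnd : (PySem.List.sorted (PySem.Dict.keys d) (fun x => x) false).Nodup)
    (hpw : (PySem.List.sorted (PySem.Dict.keys d) (fun x => x) false).Pairwise (· ≤ ·)) :
    ∀ (lines out : List String) (sec : Bool) (inj rem : List String),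
      inj ++ rem = PySem.List.sorted (PySem.Dict.keys d) (fun x => x) false →
      (lines.foldl (stepA d) (out, sec, inj)).1 = (loopB d lines out sec rem).1 ∧
      (lines.foldl (stepA d) (out, sec, inj)).2.1 = (loopB d lines out sec rem).2.1 ∧
      (lines.foldl (stepA d) (out, sec, inj)).2.2 ++ (loopB d lines out sec rem).2.2 =
        PySem.List.sorted (PySem.Dict.keys d) (fun x => x) false := by
  intro lines
  induction lines with
  | nil => intro out sec inj rem h; exact ⟨rfl, rfl, h⟩
  | cons line rest ih =>
    intro out sec inj rem h
    rw [List.foldl_cons]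
    by_cases hh : isHeaderLine line = true
    · rw [show stepA d (out, sec, inj) line = (out ++ [line], true, inj) from by simp [stepA, hh]]
      rw [show loopB d (line :: rest) out sec rem = loopB d rest (out ++ [line]) true rem from by
        simp [loopB, hh]]
      exact ih (out ++ [line]) true inj rem h
    · cases sec with
      | false =>
        rw [show stepA d (out, false, inj) line = (out ++ [line], false, inj) from by
          simp [stepA, hh]]
        rw [show loopB d (line :: rest) out false rem = loopB d rest (out ++ [line]) false rem from by
          simp [loopB, hh]]
        exact ih _ _ _ _ h
      | true =>
        by_cases ha : PySem.Str.strip line = ""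
        · rw [show stepA d (out, true, inj) line = (out ++ [line], true, inj) from by
            simp [stepA, hh, ha, isCmdLine]]
          rw [show loopB d (line :: rest) out true rem = loopB d rest (out ++ [line]) true rem from by
            simp [loopB, hh, ha]]
          exact ih _ _ _ _ h
        · by_cases hb : PySem.Chars.startswith line.toList [' ', ' '] = true
          · -- an indented, non-blank line: a command entry
            cases hparts : PySem.Str.split₀Max (PySem.Str.strip line) 1 with
            | nil =>
              rw [show stepA d (out, true, inj) line = (out ++ [line], true, inj) from by
                simp [stepA, hh, ha, hb, isCmdLine, hparts]]
              rw [show loopB d (line :: rest) out true rem = loopB d rest (out ++ [line]) true rem from by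
                simp [loopB, hh, ha, hb, hparts, emitWhileB_empty]]
              exact ih _ _ _ _ h
            | cons c cs =>
              by_cases hc : c = ""
              · have hc' := hc
                rw [show stepA d (out, true, inj) line = (out ++ [line], true, inj) from by
                  simp [stepA, hh, ha, hb, isCmdLine, hparts, hc]]
                rw [show loopB d (line :: rest) out true rem = loopB d rest (out ++ [line]) true rem from by
                  simp [loopB, hh, ha, hb, hparts, hc', emitWhileB_empty]]
                exact ih _ _ _ _ h
              · -- inject all pending commands alphabetically before c
                have hpw' : (inj ++ rem).Pairwise (· ≤ ·) := by rw [h]; exact hpw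
                have hpwrem : rem.Pairwise (· ≤ ·) := (List.pairwise_append.mp hpw').2.1
                have hfil : rem.filter (fun k => decide (k < c)) =
                    rem.takeWhile (fun k => decide (k < c)) := by
                  refine filter_eq_takeWhile_mono _ ?_ rem hpwrem
                  intro a b hab hbc
                  simp only [decide_eq_true_eq] at hbc ⊢
                  exact lt_of_le_of_lt hab hbc
                have hinj : injectBeforeA c d inj =
                    ((rem.takeWhile (fun k => decide (k < c))).map
                      (fun k => fmtHelp k (PySem.Dict.getD d k "")),
                     inj ++ rem.takeWhile (fun k => decide (k < c))) := by
                  unfold injectBeforeA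
                  rw [injectLoopA_eq d _ inj rem h hnd, hfil]
                rw [show stepA d (out, true, inj) line =
                    ((out ++ (rem.takeWhile (fun k => decide (k < c))).map
                      (fun k => fmtHelp k (PySem.Dict.getD d k ""))) ++ [line], true,
                     inj ++ rem.takeWhile (fun k => decide (k < c))) from by
                  simp [stepA, hh, ha, hb, isCmdLine, hparts, hc, hinj]]
                rw [show loopB d (line :: rest) out true rem =
                    loopB d rest ((out ++ (rem.takeWhile (fun k => decide (k < c))).map
                      (fun k => fmtHelp k (PySem.Dict.getD d k ""))) ++ [line]) true
                      (rem.dropWhile (fun k => decide (k < c))) from by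
                  simp [loopB, hh, ha, hb, hparts, emitWhileB_eq, List.append_assoc]]
                refine ih _ _ _ _ ?_
                rw [List.append_assoc, List.takeWhile_append_dropWhile]
                exact h
          · -- a non-blank, non-indented line: leave the section, flush everything pending
            have hinj : injectRemainingA d inj =
                (rem.map (fun k => fmtHelp k (PySem.Dict.getD d k "")), inj ++ rem) := by
              unfold injectRemainingA
              rw [injectLoopA_eq d _ inj rem h hnd]
              simp
            rw [show stepA d (out, true, inj) line =
                ((out ++ rem.map (fun k => fmtHelp k (PySem.Dict.getD d k ""))) ++ [line], false,
                 inj ++ rem) from by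
              simp [stepA, hh, ha, hb, hinj, isCmdLine]]
            rw [show loopB d (line :: rest) out true rem =
                loopB d rest ((out ++ rem.map (fun k => fmtHelp k (PySem.Dict.getD d k ""))) ++ [line])
                  false [] from by
              simp [loopB, hh, ha, hb, emitAllB_eq_map, List.append_assoc]]
            refine ih _ _ _ _ ?_
            rw [List.append_nil]
            exact h

-- ===== VERDICT (by name: the statement is the Claim_ definition above) =====
theorem process_help_text_with_local_commands_py_spec : Claim_equal_process_help_text_with_local_commands_py := by
  intro text lc _
  unfold Spec_process_help_text_with_local_commands_py
  unfold process_help_text_with_local_commands_py process_help_text_with_local_commands_py_alt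
  dsimp only []
  set d := PySem.Dict.ofList lc with hd
  set sKeys := PySem.List.sorted (PySem.Dict.keys d) (fun x => x) false with hsk
  have hnd : sKeys.Nodup :=
    ((PySem.List.sorted_perm (PySem.Dict.keys d) (fun x => x) false).nodup_iff).mpr
      (PySem.Dict.nodup_keys_ofList lc)
  have hpw : sKeys.Pairwise (· ≤ ·) := PySem.List.sorted_pairwise (PySem.Dict.keys d) (fun x => x)
  obtain ⟨h1, h2, h3⟩ := loop_corr d hnd hpw (pySplitNL text) [] false PySem.Set.empty sKeys rfl
  congr 1
  rw [h2]
  cases hsec : (loopB d (pySplitNL text) [] false sKeys).2.1 with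
  | false => simp; exact h1
  | true =>
    have hinj := injectLoopA_eq d (fun _ => true)
      ((pySplitNL text).foldl (stepA d) ([], false, PySem.Set.empty)).2.2
      (loopB d (pySplitNL text) [] false sKeys).2.2 h3 hnd
    simp only [List.filter_true] at hinj
    rw [show (injectRemainingA d
        ((pySplitNL text).foldl (stepA d) ([], false, PySem.Set.empty)).2.2).1
        = List.map (fun k => fmtHelp k (PySem.Dict.getD d k ""))
            (loopB d (pySplitNL text) [] false sKeys).2.2 from by
      unfold injectRemainingA; rw [hinj]]
    by_cases hrem : (loopB d (pySplitNL text) [] false sKeys).2.2 = []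
    · simp [hrem]; exact h1
    · have hbne : ((loopB d (pySplitNL text) [] false sKeys).2.2 == []) = false := by
        simp [hrem]
      have hmapne : (List.map (fun k => fmtHelp k (PySem.Dict.getD d k ""))
          (loopB d (pySplitNL text) [] false sKeys).2.2 == []) = false := by
        simp [hrem]
      rw [h1]
      simp only [hbne, hmapne, Bool.not_false, Bool.and_true, Bool.false_eq_true, if_false,
        if_true]
      rw [insertSeqA_eq _ _ _ (pvInsertIdx_le _), emitAllB_eq_map]
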